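-- pv_equiv track=rewrite | github.com/uestcNFVproject/nfvOrchestrator | nfvOrchestrator/orchestrator/newQuestion.py | compute_impact_index
-- ===== SOURCE A (Python) =====
-- infinate = 1000000
--
-- def compute_impact_index(sfi_set_for_sf, my_be):
--     index_array = []
--     for sfi in sfi_set_for_sf:
--         be_array = sfi[5]
--         index = infinate
--         my_be_count = 0
--         for be in be_array:
--             if be > my_be:
--                 continue
--             if be == my_be:
--                 my_be_count += 1
--             if index > be:
--                 index = be
--         if index == my_be:
--             # 如果出现两次及以上，index才是my_be
--             if my_be_count == 1:
--                 index = infinate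
--         index_array.append(index)
--     return index_array
-- ===== SOURCE B (Python) =====
-- infinate = 1000000
--
--
-- def compute_impact_index(sfi_set_for_sf, my_be):
--     out = []
--     for sfi in sfi_set_for_sf:
--         # histogram of the admissible be-values: one dict pass, no min/count accumulators
--         freq = {}
--         for be in sfi[5]:
--             if be <= my_be:
--                 freq[be] = freq.get(be, 0) + 1
--         index = min([infinate] + list(freq))
--         if index == my_be and freq.get(my_be, 0) == 1:
--             index = infinate
--         out.append(index)
--     return out
-- ===== Notes on version B (the rewrite author's own statement) =====
-- stated objective: alternative
-- what changed: B maintains a different data structure: a per-sfi frequency dict of the values <= my_be built in one pass, from which the index is min over the distinct keys plus the sentinel and the tie count is a single O(1) lookup, replacing A's fused running-min and my_be-counter accumulation.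
import Mathlib
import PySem

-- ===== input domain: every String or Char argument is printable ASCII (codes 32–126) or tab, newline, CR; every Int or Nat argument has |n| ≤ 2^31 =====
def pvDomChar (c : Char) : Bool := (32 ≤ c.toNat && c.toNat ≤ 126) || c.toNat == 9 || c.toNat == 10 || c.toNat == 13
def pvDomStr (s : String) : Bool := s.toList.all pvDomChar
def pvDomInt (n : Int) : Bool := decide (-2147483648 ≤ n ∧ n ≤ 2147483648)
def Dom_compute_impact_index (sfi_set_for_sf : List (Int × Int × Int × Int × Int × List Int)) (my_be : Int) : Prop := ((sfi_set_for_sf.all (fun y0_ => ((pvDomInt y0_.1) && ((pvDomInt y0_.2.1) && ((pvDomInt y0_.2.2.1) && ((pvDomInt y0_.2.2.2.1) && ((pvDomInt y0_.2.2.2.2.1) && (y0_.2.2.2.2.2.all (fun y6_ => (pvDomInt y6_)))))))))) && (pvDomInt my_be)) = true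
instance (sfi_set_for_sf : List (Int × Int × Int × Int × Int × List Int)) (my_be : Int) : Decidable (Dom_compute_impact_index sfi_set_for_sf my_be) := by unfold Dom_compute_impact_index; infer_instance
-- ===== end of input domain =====

-- B keeps a per-sfi frequency dict of the values ≤ my_be instead of A's fused running-min/counter loop; same O(n) cost.
-- ===== PORT A =====
def compute_impact_index (sfi_set_for_sf : List (Int × Int × Int × Int × Int × List Int)) (my_be : Int) : List Int :=
  sfi_set_for_sf.foldl (fun index_array sfi =>
    let be_array := sfi.2.2.2.2.2
    let st := be_array.foldl (fun (st : Int × Int) be =>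
      if be > my_be then st
      else
        let st1 := if be == my_be then (st.1, st.2 + 1) else st
        if st1.1 > be then (be, st1.2) else st1) ((1000000 : Int), (0 : Int))
    let index := if st.1 == my_be then (if st.2 == 1 then (1000000 : Int) else st.1) else st.1
    index_array ++ [index]) []

-- ===== PORT B =====
def compute_impact_index_alt (sfi_set_for_sf : List (Int × Int × Int × Int × Int × List Int)) (my_be : Int) : List Int :=
  sfi_set_for_sf.foldl (fun out sfi =>
    let freq := sfi.2.2.2.2.2.foldl (fun (d : PySem.Dict Int Int) be =>
      if be ≤ my_be then d.modify be 0 (· + 1) else d) PySem.Dict.empty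
    let index := (PySem.List.min? ((1000000 : Int) :: freq.keys) (fun y => y)).getD 0
    let index := if index == my_be && freq.getD my_be 0 == 1 then (1000000 : Int) else index
    out ++ [index]) []

-- ===== PRECONDITION & SPEC =====
def Spec_compute_impact_index (sfi_set_for_sf : List (Int × Int × Int × Int × Int × List Int)) (my_be : Int) (out : List Int) : Prop := out = compute_impact_index_alt sfi_set_for_sf my_be
instance (sfi_set_for_sf : List (Int × Int × Int × Int × Int × List Int)) (my_be : Int) (out : List Int) : Decidable (Spec_compute_impact_index sfi_set_for_sf my_be out) := by unfold Spec_compute_impact_index; infer_instance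

-- ===== CLAIM (what is proved, stated in full; the proofs are below) =====
def Claim_equal_compute_impact_index : Prop := ∀ (sfi_set_for_sf : List (Int × Int × Int × Int × Int × List Int)) (my_be : Int), Dom_compute_impact_index sfi_set_for_sf my_be → Spec_compute_impact_index sfi_set_for_sf my_be (compute_impact_index sfi_set_for_sf my_be)

-- ===== LEMMAS AND PROOFS =====
-- A's interleaved inner loop computes (running min over the kept elements, count of my_be among them).
theorem inner_loop_eq (my_be : Int) (l : List Int) : ∀ (i c : Int),
    l.foldl (fun (st : Int × Int) be =>
      if be > my_be then st
      else
        let st1 := if be == my_be then (st.1, st.2 + 1) else st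
        if st1.1 > be then (be, st1.2) else st1) (i, c)
    = ((l.filter (fun be => decide (be ≤ my_be))).foldl min i,
       c + ((l.filter (fun be => decide (be ≤ my_be))).count my_be : Int)) := by
  induction l with
  | nil => intro i c; simp
  | cons x t ih =>
    intro i c
    rw [List.foldl_cons]
    by_cases hx : x > my_be
    · have h1 : (if x > my_be then (i, c)
          else
            let st1 := if x == my_be then ((i, c).1, (i, c).2 + 1) else (i, c)
            if st1.1 > x then (x, st1.2) else st1) = (i, c) := by
        simp [hx]
      rw [h1, ih]
      simp [not_le.mpr hx]
    · have hle : x ≤ my_be := not_lt.mp hx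
      have h1 : (if x > my_be then (i, c)
          else
            let st1 := if x == my_be then ((i, c).1, (i, c).2 + 1) else (i, c)
            if st1.1 > x then (x, st1.2) else st1)
          = (min i x, if x = my_be then c + 1 else c) := by
        by_cases he : x = my_be
        · subst he
          by_cases hgt : x < i
          · simp [hx, hgt, min_def, not_le.mpr hgt]
          · simp [hx, hgt, min_def, not_lt.mp hgt]
        · by_cases hgt : i > x
          · simp [hx, he, hgt, min_eq_right (le_of_lt hgt)]
          · simp [hx, he, hgt, min_eq_left (not_lt.mp hgt)]
      rw [h1, ih, List.filter_cons_of_pos (by simpa using hle), List.foldl_cons,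
        List.count_cons]
      by_cases he : x = my_be <;> simp [he] <;> push_cast <;> ring

-- A running min absorbs Set.add: an already-present element does not change the min.
theorem foldl_min_set_add (s : List Int) (x i : Int) :
    (PySem.Set.add s x).foldl min i = min (s.foldl min i) x := by
  by_cases h : x ∈ s
  · have hle := (PySem.List.foldl_min_le s i).2 x h
    simp [PySem.Set.add, h, min_eq_left hle]
  · simp [PySem.Set.add, h]

-- The running min over the ordered dedup (Set.ofList) equals the running min over the list itself.
theorem foldl_min_ofList_aux (l : List Int) : ∀ (acc : List Int) (i : Int),
    (l.foldl PySem.Set.add acc).foldl min i = l.foldl min (acc.foldl min i) := by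
  induction l with
  | nil => intro acc i; simp
  | cons x t ih =>
    intro acc i
    simp only [List.foldl_cons]
    rw [ih (PySem.Set.add acc x) i, foldl_min_set_add]

theorem foldl_min_ofList (l : List Int) (i : Int) :
    (PySem.Set.ofList l).foldl min i = l.foldl min i := by
  rw [PySem.Set.ofList_eq_foldl, foldl_min_ofList_aux l [] i]
  simp

-- The two post-loop conditionals agree.
theorem cond_eq (m b : Int) (k : Nat) :
    (if m == b then (if (k : Int) == 1 then (1000000 : Int) else m) else m)
    = if m == b && (k : Int) == 1 then 1000000 else m := by
  by_cases hm : m = b <;> by_cases hk : (k : Int) = 1 <;> simp [hm, hk]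

-- Proof-side names for the two per-sfi bodies (definitionally the fold states of the ports).
def stA (my_be : Int) (l : List Int) : Int × Int :=
  l.foldl (fun (st : Int × Int) be =>
    if be > my_be then st
    else
      let st1 := if be == my_be then (st.1, st.2 + 1) else st
      if st1.1 > be then (be, st1.2) else st1) ((1000000 : Int), (0 : Int))

def freqB (my_be : Int) (l : List Int) : PySem.Dict Int Int :=
  l.foldl (fun (d : PySem.Dict Int Int) be =>
    if be ≤ my_be then d.modify be 0 (· + 1) else d) PySem.Dict.empty

def idxB (my_be : Int) (l : List Int) : Int :=
  (PySem.List.min? ((1000000 : Int) :: (freqB my_be l).keys) (fun y => y)).getD 0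

-- Per-sfi equality of the two bodies.
theorem body_eq (my_be : Int) (l : List Int) :
    (if (stA my_be l).1 == my_be
       then (if (stA my_be l).2 == 1 then (1000000 : Int) else (stA my_be l).1)
       else (stA my_be l).1)
    = (if idxB my_be l == my_be && (freqB my_be l).getD my_be 0 == 1
         then (1000000 : Int) else idxB my_be l) := by
  have hfreq : freqB my_be l
      = PySem.Dict.counter (l.filter (fun be => decide (be ≤ my_be))) := by
    rw [freqB, PySem.Dict.counter_eq_foldl, PySem.List.foldl_ite_eq_foldl_filter]
  rw [stA, inner_loop_eq, idxB, hfreq, PySem.Dict.keys_counter, PySem.List.min?_id_cons,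
    PySem.Dict.getD_counter, foldl_min_ofList]
  simp only [Option.getD_some, zero_add]
  exact cond_eq _ _ _

-- ===== VERDICT (by name: the statement is the Claim_ definition above) =====
theorem compute_impact_index_spec : Claim_equal_compute_impact_index := by
  intro s my_be _
  show _ = _
  unfold compute_impact_index compute_impact_index_alt
  rw [PySem.List.foldl_append_singleton_eq_map, PySem.List.foldl_append_singleton_eq_map]
  exact congrArg _ (List.map_congr_left (fun sfi _ => body_eq my_be sfi.2.2.2.2.2))
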